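-- pv_equiv track=rewrite | github.com/dihzin/Axiora-Path | apps/api/tests/test_learning_template_item_builder.py | _ordering_is_trivial_adjacent_swap
-- ===== SOURCE A (Python) =====
-- def _ordering_is_trivial_adjacent_swap(labels: list[str], correct_order: list[str]) -> bool:
--     if labels == correct_order:
--         return True
--     mismatches = [index for index, (label, correct) in enumerate(zip(labels, correct_order, strict=True)) if label != correct]
--     if len(mismatches) != 2:
--         return False
--     left, right = mismatches
--     return right == left + 1 and labels[left] == correct_order[right] and labels[right] == correct_order[left]
-- ===== SOURCE B (Python) =====
-- def _ordering_is_trivial_adjacent_swap(labels: list[str], correct_order: list[str]) -> bool: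
--     if labels == correct_order:
--         return True
--     for i in range(len(labels) - 1):
--         candidate = labels[:i] + [labels[i + 1], labels[i]] + labels[i + 2:]
--         if candidate == correct_order:
--             return True
--     return False
-- ===== Notes on version B (the rewrite author's own statement) =====
-- stated objective: alternative
-- what changed: B replaces A's locate-the-mismatch-indices check (enumerate+filter then inspect the two indices) with a generate-and-test search that tries each adjacent-swap candidate list and compares it to correct_order.
import Mathlib
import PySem

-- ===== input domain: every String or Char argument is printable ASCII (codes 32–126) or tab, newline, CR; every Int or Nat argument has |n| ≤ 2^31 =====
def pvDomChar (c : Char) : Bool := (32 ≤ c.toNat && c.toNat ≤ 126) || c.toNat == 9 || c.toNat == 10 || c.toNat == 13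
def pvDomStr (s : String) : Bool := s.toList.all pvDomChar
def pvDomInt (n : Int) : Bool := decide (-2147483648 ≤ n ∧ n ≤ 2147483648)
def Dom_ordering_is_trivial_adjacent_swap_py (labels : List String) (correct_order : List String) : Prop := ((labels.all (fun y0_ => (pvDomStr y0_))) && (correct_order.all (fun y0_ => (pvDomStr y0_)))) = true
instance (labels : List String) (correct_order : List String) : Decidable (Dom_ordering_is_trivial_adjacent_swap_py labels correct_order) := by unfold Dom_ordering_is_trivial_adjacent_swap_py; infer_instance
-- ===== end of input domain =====

-- B replaces A's locate-the-mismatch-indices check with a generate-and-test search over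
-- adjacent-swap candidates (alternative algorithm, no speed claim); A raises ValueError on
-- unequal lengths (zip strict=True), excluded by Pre_; B returns False there.

-- ===== PORT A =====
-- mismatches = [index for index, (label, correct) in enumerate(zip(labels, correct_order, strict=True)) if label != correct]
-- (strict=True raises on unequal lengths; Pre_ restricts to equal lengths, where List.zip is exact)
def ordering_is_trivial_adjacent_swap_py (labels : List String) (correct_order : List String) : Bool :=
  if labels == correct_order then true
  else
    let mismatches : List Int :=
      ((PySem.List.enumerate (labels.zip correct_order) 0).filter
        (fun p => p.2.1 != p.2.2)).map (fun p => p.1)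
    if mismatches.length ≠ 2 then false
    else
      match mismatches with
      | [left, right] =>
          -- labels[left] etc.: indices come from enumerate, hence in range; pyGetD is exact there
          right == left + 1
            && PySem.List.pyGetD labels left "" == PySem.List.pyGetD correct_order right ""
            && PySem.List.pyGetD labels right "" == PySem.List.pyGetD correct_order left ""
      | _ => false

-- ===== PORT B =====
-- candidate = labels[:i] + [labels[i+1], labels[i]] + labels[i+2:] ; i ranges over range(len(labels)-1),
-- so i, i+1 are in range and the slices have nonnegative in-range bounds: take/drop and pyGetD are exact
def ordering_is_trivial_adjacent_swap_py_alt (labels : List String) (correct_order : List String) : Bool :=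
  if labels == correct_order then true
  else
    (List.range (labels.length - 1)).any (fun i =>
      (labels.take i
        ++ [PySem.List.pyGetD labels ((i : Int) + 1) "", PySem.List.pyGetD labels (i : Int) ""]
        ++ labels.drop (i + 2)) == correct_order)

-- ===== PRECONDITION & SPEC =====
-- Pre_ excludes exactly the inputs of unequal length, on which A raises ValueError (zip strict=True);
-- B returns False there.
def Pre_ordering_is_trivial_adjacent_swap_py (labels : List String) (correct_order : List String) : Prop :=
  labels.length = correct_order.length
instance (labels : List String) (correct_order : List String) : Decidable (Pre_ordering_is_trivial_adjacent_swap_py labels correct_order) := by unfold Pre_ordering_is_trivial_adjacent_swap_py; infer_instance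

def pvWitness_ordering_is_trivial_adjacent_swap_py : List String × List String := (["a", "b", "c"], ["b", "a", "c"])

def Spec_ordering_is_trivial_adjacent_swap_py (labels : List String) (correct_order : List String) (out : Bool) : Prop := out = ordering_is_trivial_adjacent_swap_py_alt labels correct_order
instance (labels : List String) (correct_order : List String) (out : Bool) : Decidable (Spec_ordering_is_trivial_adjacent_swap_py labels correct_order out) := by unfold Spec_ordering_is_trivial_adjacent_swap_py; infer_instance

-- ===== CLAIM (what is proved, stated in full; the proofs are below) =====
def Claim_equal_ordering_is_trivial_adjacent_swap_py : Prop := ∀ (labels : List String) (correct_order : List String), Dom_ordering_is_trivial_adjacent_swap_py labels correct_order → Pre_ordering_is_trivial_adjacent_swap_py labels correct_order → Spec_ordering_is_trivial_adjacent_swap_py labels correct_order (ordering_is_trivial_adjacent_swap_py labels correct_order)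



-- ===== LEMMAS AND PROOFS =====

-- common spec: the two lists are equal, or differ by exactly one adjacent transposition
def pvSwapSpec : List String → List String → Bool
  | [], [] => true
  | a :: as, c :: cs =>
      if a = c then pvSwapSpec as cs
      else
        match as, cs with
        | b :: as', d :: cs' => a = d && b = c && as' = cs'
        | _, _ => false
  | _, _ => false

theorem pvSwapSpec_refl : ∀ xs : List String, pvSwapSpec xs xs = true := by
  intro xs; induction xs with
  | nil => rfl
  | cons x t ih => simp [pvSwapSpec, ih]

-- Nat-level mismatch-index list
def pvMiN : List String → List String → List Nat
  | a :: as, c :: cs => (if a = c then [] else [0]) ++ (pvMiN as cs).map (· + 1)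
  | _, _ => []

theorem pvMiN_refl : ∀ xs : List String, pvMiN xs xs = [] := by
  intro xs; induction xs with
  | nil => rfl
  | cons x t ih => simp [pvMiN, ih]

theorem pvMiN_eq_nil : ∀ (xs ys : List String), xs.length = ys.length → pvMiN xs ys = [] → xs = ys := by
  intro xs
  induction xs with
  | nil => intro ys h _; cases ys with | nil => rfl | cons c cs => simp at h
  | cons a as ih =>
      intro ys h hm
      cases ys with
      | nil => simp at h
      | cons c cs =>
          simp only [pvMiN] at hm
          by_cases hac : a = c
          · simp [hac] at hm ⊢
            exact ih cs (by simpa using h) (by simpa using hm)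
          · simp [hac] at hm

theorem pvMisA_gen : ∀ (ls cs : List String) (s : Int),
    ((PySem.List.enumerate (ls.zip cs) s).filter (fun p => p.2.1 != p.2.2)).map (fun p => p.1)
      = List.map (fun n : Nat => (n : Int) + s) (pvMiN ls cs) := by
  intro ls
  induction ls with
  | nil => intro cs s; simp [pvMiN, PySem.List.enumerate]
  | cons a as ih =>
      intro cs s
      cases cs with
      | nil => simp [pvMiN, PySem.List.enumerate]
      | cons c cs =>
          rw [List.zip_cons_cons, PySem.List.enumerate_cons]
          by_cases hac : a = c
          · rw [List.filter_cons_of_neg (by simp [hac])]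
            have hmi : pvMiN (a :: as) (c :: cs) = (pvMiN as cs).map (· + 1) := by
              simp [pvMiN, hac]
            rw [hmi, ih cs (s + 1), List.map_map]
            exact List.map_congr_left (fun n _ => by simp [Function.comp_def]; push_cast; ring)
          · rw [List.filter_cons_of_pos (by simp [hac])]
            have hmi : pvMiN (a :: as) (c :: cs) = 0 :: (pvMiN as cs).map (· + 1) := by
              simp [pvMiN, hac]
            rw [hmi, List.map_cons, List.map_cons, ih cs (s + 1), List.map_map]
            refine congrArg₂ _ (by simp) ?_
            exact List.map_congr_left (fun n _ => by simp [Function.comp_def]; push_cast; ring)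

-- Nat-level core of A
def pvCoreN (m : List Nat) (ls cs : List String) : Bool :=
  match m with
  | [l, r] =>
      r == l + 1 && ls.getD l "" == cs.getD r "" && ls.getD r "" == cs.getD l ""
  | _ => false

theorem pvA_eq_coreN (ls cs : List String) :
    ordering_is_trivial_adjacent_swap_py ls cs
      = if ls == cs then true else pvCoreN (pvMiN ls cs) ls cs := by
  unfold ordering_is_trivial_adjacent_swap_py
  by_cases h : ls = cs
  · simp [h]
  · have hg := pvMisA_gen ls cs 0
    simp only [add_zero] at hg
    simp only [h, beq_iff_eq, if_neg, if_false, hg]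
    cases hm : pvMiN ls cs with
    | nil => simp [pvCoreN]
    | cons l t =>
        cases t with
        | nil => simp [pvCoreN]
        | cons r t2 =>
            cases t2 with
            | nil =>
                simp only [List.map_cons, List.map_nil, pvCoreN, List.length_cons,
                  List.length_nil]
                have hbeq : (((r : Nat) : Int) == ((l : Nat) : Int) + 1) = (r == l + 1) := by
                  by_cases hrl : r = l + 1 <;> simp [hrl] <;> omega
                simp [hbeq, PySem.List.pyGetD_natCast]
            | cons z t3 => simp [pvCoreN]

theorem pvA_eq_spec : ∀ (ls cs : List String), ls.length = cs.length →
    ordering_is_trivial_adjacent_swap_py ls cs = pvSwapSpec ls cs := by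
  intro ls
  induction ls with
  | nil =>
      intro cs h; cases cs with
      | nil => simp [pvA_eq_coreN, pvSwapSpec]
      | cons c t => simp at h
  | cons a as ih =>
      intro cs h
      cases cs with
      | nil => simp at h
      | cons c cs =>
          have hlen : as.length = cs.length := by simpa using h
          by_cases hac : a = c
          · subst hac
            by_cases heq : as = cs
            · subst heq; simp [pvA_eq_coreN, pvSwapSpec_refl]
            · have hA : ordering_is_trivial_adjacent_swap_py (a :: as) (a :: cs)
                  = pvCoreN (pvMiN (a :: as) (a :: cs)) (a :: as) (a :: cs) := by
                rw [pvA_eq_coreN]; simp [heq]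
              have hmi : pvMiN (a :: as) (a :: cs) = (pvMiN as cs).map (· + 1) := by
                simp [pvMiN]
              have hshift : pvCoreN ((pvMiN as cs).map (· + 1)) (a :: as) (a :: cs)
                  = pvCoreN (pvMiN as cs) as cs := by
                cases hm : pvMiN as cs with
                | nil => simp [pvCoreN]
                | cons l t =>
                    cases t with
                    | nil => simp [pvCoreN]
                    | cons r t2 =>
                        cases t2 with
                        | nil => simp [pvCoreN]
                        | cons z t3 => simp [pvCoreN]
              have hspec : pvSwapSpec (a :: as) (a :: cs) = pvSwapSpec as cs := by
                simp [pvSwapSpec]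
              rw [hA, hmi, hshift, hspec, ← ih cs hlen, pvA_eq_coreN]
              simp [heq]
          · have hne : (a :: as) ≠ (c :: cs) := by simp [hac]
            rw [pvA_eq_coreN]
            simp only [hne, beq_iff_eq, if_neg, if_false]
            have hmi : pvMiN (a :: as) (c :: cs) = 0 :: (pvMiN as cs).map (· + 1) := by
              simp [pvMiN, hac]
            rw [hmi]
            simp only [pvSwapSpec, if_neg hac]
            cases as with
            | nil =>
                cases cs with
                | nil => simp [pvMiN, pvCoreN]
                | cons d cs2 => simp at hlen
            | cons b as2 =>
                cases cs with
                | nil => simp at hlen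
                | cons d cs2 =>
                    have hlen2 : as2.length = cs2.length := by simpa using hlen
                    by_cases hbd : b = d
                    · -- the second position agrees, so a single adjacent swap is impossible
                      have hclause : (decide (a = d) && decide (b = c) && decide (as2 = cs2)) = false := by
                        by_cases had : a = d
                        · by_cases hbc : b = c
                          · exact absurd (had.trans (hbd.symm.trans hbc)) hac
                          · simp [hbc]
                        · simp [had]
                      have hmi2 : pvMiN (b :: as2) (d :: cs2) = (pvMiN as2 cs2).map (· + 1) := by
                        simp [pvMiN, hbd]
                      rw [hmi2]
                      cases hm : pvMiN as2 cs2 with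
                      | nil => simpa [pvCoreN] using hclause.symm
                      | cons l t =>
                          cases t with
                          | nil =>
                              simp only [List.map_cons, List.map_nil, pvCoreN, hclause]
                              have hc : (l + 1 + 1 == 0 + 1) = false := by
                                simp only [beq_eq_false_iff_ne, ne_eq]; omega
                              rw [hc, Bool.false_and, Bool.false_and]
                          | cons r t2 =>
                              cases t2 with
                              | nil => simpa [pvCoreN] using hclause.symm
                              | cons z t3 => simpa [pvCoreN] using hclause.symm
                    · have hmi2 : pvMiN (b :: as2) (d :: cs2) = 0 :: (pvMiN as2 cs2).map (· + 1) := by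
                        simp [pvMiN, hbd]
                      rw [hmi2]
                      cases hm : pvMiN as2 cs2 with
                      | nil =>
                          have heq2 : as2 = cs2 := pvMiN_eq_nil as2 cs2 hlen2 hm
                          simp only [List.map_nil, pvCoreN, heq2]
                          rw [Bool.eq_iff_iff]
                          simp [Bool.and_comm]
                      | cons l t =>
                          have hne2 : as2 ≠ cs2 := by
                            intro he; rw [he, pvMiN_refl] at hm
                            exact absurd hm.symm (List.cons_ne_nil l t)
                          simp only [List.map_cons, pvCoreN]
                          cases t with
                          | nil => simp [hne2]
                          | cons r t2 => simp [hne2]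

-- B side
def pvCandN (ls : List String) (i : Nat) : List String :=
  ls.take i ++ [ls.getD (i + 1) "", ls.getD i ""] ++ ls.drop (i + 2)

theorem pvGetD_int_add_one (xs : List String) (i : Nat) (d : String) :
    PySem.List.pyGetD xs ((i : Int) + 1) d = xs.getD (i + 1) d := by
  have h : ((i : Int) + 1) = ((i + 1 : Nat) : Int) := by push_cast; ring
  rw [h, PySem.List.pyGetD_natCast]

theorem pvB_eq_cand (ls cs : List String) :
    ordering_is_trivial_adjacent_swap_py_alt ls cs
      = if ls == cs then true
        else (List.range (ls.length - 1)).any (fun i => pvCandN ls i == cs) := by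
  unfold ordering_is_trivial_adjacent_swap_py_alt pvCandN
  simp [pvGetD_int_add_one, PySem.List.pyGetD_natCast]

theorem pvCandN_cons_succ (a : String) (ls : List String) (i : Nat) :
    pvCandN (a :: ls) (i + 1) = a :: pvCandN ls i := by
  simp [pvCandN]

theorem pvB_eq_spec : ∀ (ls cs : List String), ls.length = cs.length →
    ordering_is_trivial_adjacent_swap_py_alt ls cs = pvSwapSpec ls cs := by
  intro ls
  induction ls with
  | nil =>
      intro cs h; cases cs with
      | nil => simp [pvB_eq_cand, pvSwapSpec]
      | cons c t => simp at h
  | cons a as ih =>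
      intro cs h
      cases cs with
      | nil => simp at h
      | cons c cs =>
          have hlen : as.length = cs.length := by simpa using h
          rw [pvB_eq_cand]
          by_cases hac : a = c
          · subst hac
            by_cases heq : as = cs
            · subst heq; simp [pvSwapSpec_refl]
            · have hne : (a :: as) ≠ (a :: cs) := by simp [heq]
              simp only [hne, beq_iff_eq, if_neg, if_false]
              have hspec : pvSwapSpec (a :: as) (a :: cs) = pvSwapSpec as cs := by
                simp [pvSwapSpec]
              rw [hspec, ← ih cs hlen, pvB_eq_cand]
              simp only [heq, beq_iff_eq, if_neg, if_false]
              cases as with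
              | nil =>
                  cases cs with
                  | nil => exact absurd rfl heq
                  | cons d t => simp at hlen
              | cons b as2 =>
                  have hn : (a :: b :: as2).length - 1 = as2.length + 1 := by simp
                  rw [hn, List.range_succ_eq_map]
                  simp only [List.any_cons, List.any_map, Function.comp_def, pvCandN_cons_succ]
                  have h0 : (pvCandN (a :: b :: as2) 0 == a :: cs) = false := by
                    simp only [pvCandN, List.take_zero, List.nil_append, List.getD_cons_succ,
                      List.getD_cons_zero, List.drop_succ_cons, List.drop_zero, List.cons_append,
                      List.nil_append, beq_eq_false_iff_ne, ne_eq]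
                    intro he
                    obtain ⟨hba, htail⟩ := List.cons_eq_cons.mp he
                    exact heq (by rw [hba]; exact htail)
                  rw [h0]
                  simp [List.cons_eq_cons]
          · have hne : (a :: as) ≠ (c :: cs) := by simp [hac]
            simp only [hne, beq_iff_eq, if_neg, if_false]
            cases as with
            | nil =>
                cases cs with
                | nil => simp [pvSwapSpec, hac]
                | cons d t => simp at hlen
            | cons b as2 =>
                cases cs with
                | nil => simp at hlen
                | cons d cs2 =>
                    have hn : (a :: b :: as2).length - 1 = as2.length + 1 := by simp
                    rw [hn, List.range_succ_eq_map]
                    simp only [List.any_cons, List.any_map, Function.comp_def, pvCandN_cons_succ]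
                    have hrest : ((List.range as2.length).any
                        (fun i => a :: pvCandN (b :: as2) i == c :: d :: cs2)) = false := by
                      simp [List.cons_eq_cons, hac]
                    rw [hrest, Bool.or_false]
                    have h0 : pvCandN (a :: b :: as2) 0 = b :: a :: as2 := by
                      simp [pvCandN]
                    rw [h0]
                    simp only [pvSwapSpec, if_neg hac]
                    rw [Bool.eq_iff_iff]
                    simp [List.cons_eq_cons]
                    tauto

-- ===== VERDICT (by name: the statement is the Claim_ definition above) =====
theorem ordering_is_trivial_adjacent_swap_py_spec : Claim_equal_ordering_is_trivial_adjacent_swap_py := by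
  intro ls cs _ hpre
  unfold Spec_ordering_is_trivial_adjacent_swap_py
  rw [pvA_eq_spec ls cs hpre, pvB_eq_spec ls cs hpre]
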